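-- pv_equiv track=rewrite | github.com/leifengzhou/info-aggregator | src/transcript/extractor.py | _select_preferred_track
-- ===== SOURCE A (Python) =====
-- def _select_preferred_track(tracks: list[dict]) -> dict | None:
--     for preferred_ext in ("json3", "srv3", "vtt"):
--         for track in tracks:
--             ext = str(track.get("ext") or "").lower()
--             if ext == preferred_ext and track.get("url"):
--                 return track
--
--     for track in tracks:
--         if track.get("url"):
--             return track
--     return None
-- ===== SOURCE B (Python) =====
-- _PRIORITY = {"json3": 0, "srv3": 1, "vtt": 2}
--
-- def _select_preferred_track(tracks: list[dict]) -> dict | None: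
--     best = None
--     best_p = 4
--     for track in tracks:
--         if not track.get("url"):
--             continue
--         ext = str(track.get("ext") or "").lower()
--         p = _PRIORITY.get(ext, 3)
--         if p < best_p:
--             best, best_p = track, p
--     return best
-- ===== Notes on version B (the rewrite author's own statement) =====
-- stated objective: alternative
-- what changed: Replaces A's four sequential scans (one per preferred extension, then a fallback scan) with a single pass that keeps the first track of smallest extension priority (json3<srv3<vtt<other) among tracks with a truthy url.
import Mathlib
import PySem

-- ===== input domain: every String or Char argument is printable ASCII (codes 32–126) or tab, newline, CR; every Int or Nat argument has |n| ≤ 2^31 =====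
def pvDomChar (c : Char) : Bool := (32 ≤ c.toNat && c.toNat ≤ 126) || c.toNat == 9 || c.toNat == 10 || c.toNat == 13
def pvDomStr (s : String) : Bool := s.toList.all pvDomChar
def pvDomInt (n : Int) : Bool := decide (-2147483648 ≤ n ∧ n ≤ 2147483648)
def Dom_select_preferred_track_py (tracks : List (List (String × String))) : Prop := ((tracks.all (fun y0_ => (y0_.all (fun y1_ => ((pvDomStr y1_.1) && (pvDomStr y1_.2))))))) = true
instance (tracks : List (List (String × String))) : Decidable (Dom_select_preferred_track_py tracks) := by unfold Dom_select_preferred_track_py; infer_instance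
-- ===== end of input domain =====

-- B replaces A's four sequential scans (one per preferred extension, then a fallback) with a single
-- pass keeping the first track of smallest extension priority among tracks with a non-empty url
-- (objective: alternative single-pass algorithm, same cost).

-- shared with B only as the dict-get primitive: track.get(k) on an association list (first match)
def pvGetS (t : List (String × String)) (k : String) : Option String :=
  (t.find? (fun kv => kv.1 == k)).map (·.2)

-- ext = str(track.get("ext") or "").lower()
def pvExtOf (t : List (String × String)) : String :=
  PySem.Str.lower ((pvGetS t "ext").getD "")

-- bool(track.get("url")) for string values
def pvUrlOk (t : List (String × String)) : Bool :=
  !((pvGetS t "url").getD "" == "")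

-- ===== PORT A =====
-- inner loop: for track in tracks: if ext == preferred_ext and track.get("url"): return track
def pvPickExt (pref : String) : List (List (String × String)) → Option (List (String × String))
  | [] => none
  | t :: ts => if pvExtOf t == pref && pvUrlOk t then some t else pvPickExt pref ts

-- fallback loop: for track in tracks: if track.get("url"): return track
def pvPickUrl : List (List (String × String)) → Option (List (String × String))
  | [] => none
  | t :: ts => if pvUrlOk t then some t else pvPickUrl ts

-- outer loop over ("json3", "srv3", "vtt") with early return
def pvLoopPref (tracks : List (List (String × String))) : List String → Option (List (String × String))
  | [] => none
  | p :: ps =>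
    match pvPickExt p tracks with
    | some t => some t
    | none => pvLoopPref tracks ps

def select_preferred_track_py (tracks : List (List (String × String))) : Option (List (String × String)) :=
  match pvLoopPref tracks ["json3", "srv3", "vtt"] with
  | some t => some t
  | none => pvPickUrl tracks

-- ===== PORT B =====
-- p = _PRIORITY.get(ext, 3)
def pvPrio (ext : String) : Int :=
  PySem.Dict.getD (PySem.Dict.ofList [("json3", (0 : Int)), ("srv3", 1), ("vtt", 2)]) ext 3

-- the single pass with accumulator (best, best_p)
def pvGoB : List (List (String × String)) → Option (List (String × String)) → Int → Option (List (String × String))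
  | [], best, _ => best
  | t :: ts, best, bp =>
    if !pvUrlOk t then pvGoB ts best bp
    else
      let p := pvPrio (pvExtOf t)
      if p < bp then pvGoB ts (some t) p else pvGoB ts best bp

def select_preferred_track_py_alt (tracks : List (List (String × String))) : Option (List (String × String)) :=
  pvGoB tracks none 4

-- ===== PRECONDITION & SPEC =====
def Spec_select_preferred_track_py (tracks : List (List (String × String))) (out : Option (List (String × String))) : Prop := out = select_preferred_track_py_alt tracks
instance (tracks : List (List (String × String))) (out : Option (List (String × String))) : Decidable (Spec_select_preferred_track_py tracks out) := by unfold Spec_select_preferred_track_py; infer_instance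

-- ===== CLAIM (what is proved, stated in full; the proofs are below) =====
def Claim_equal_select_preferred_track_py : Prop := ∀ (tracks : List (List (String × String))), Dom_select_preferred_track_py tracks → Spec_select_preferred_track_py tracks (select_preferred_track_py tracks)

-- ===== LEMMAS AND PROOFS =====

-- keep the better of the current best b and a candidate result o (b wins ties / earlier position)
def pvMerge (b : List (String × String)) (o : Option (List (String × String))) :
    Option (List (String × String)) :=
  match o with
  | none => some b
  | some u => if pvPrio (pvExtOf u) < pvPrio (pvExtOf b) then some u else some b

-- "first minimum" reference function both ports are reduced to
def pvSpec : List (List (String × String)) → Option (List (String × String))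
  | [] => none
  | t :: ts => if pvUrlOk t then pvMerge t (pvSpec ts) else pvSpec ts

-- A's nested loops written as a flat four-way chain
def pvChain (l : List (List (String × String))) : Option (List (String × String)) :=
  match pvPickExt "json3" l with
  | some x => some x
  | none =>
    match pvPickExt "srv3" l with
    | some x => some x
    | none =>
      match pvPickExt "vtt" l with
      | some x => some x
      | none => pvPickUrl l

theorem A_unfold (l : List (List (String × String))) :
    select_preferred_track_py l = pvChain l := by
  simp only [select_preferred_track_py, pvLoopPref, pvChain]
  cases pvPickExt "json3" l <;> cases pvPickExt "srv3" l <;> cases pvPickExt "vtt" l <;> rfl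

theorem pvPrio_eq (e : String) :
    pvPrio e = if e == "json3" then 0 else if e == "srv3" then 1 else if e == "vtt" then 2 else 3 := by
  by_cases h1 : e = "json3"
  · subst h1; decide
  by_cases h2 : e = "srv3"
  · subst h2; decide
  by_cases h3 : e = "vtt"
  · subst h3; decide
  have b1 : ("json3" == e) = false := by simp; exact fun hh => h1 hh.symm
  have b2 : ("srv3" == e) = false := by simp; exact fun hh => h2 hh.symm
  have b3 : ("vtt" == e) = false := by simp; exact fun hh => h3 hh.symm
  simp [pvPrio, PySem.Dict.getD, PySem.Dict.get?, List.find?, b1, b2, b3, h1, h2, h3,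
    show (PySem.Dict.ofList [("json3", (0 : Int)), ("srv3", 1), ("vtt", 2)]).items
      = [("json3", (0 : Int)), ("srv3", 1), ("vtt", 2)] from rfl]

theorem pvPrio_nonneg (e : String) : 0 ≤ pvPrio e := by
  rw [pvPrio_eq]; split_ifs <;> omega

theorem pvPrio_le_three (e : String) : pvPrio e ≤ 3 := by
  rw [pvPrio_eq]; split_ifs <;> omega

theorem pvPrio_ge_one {e : String} (h : e ≠ "json3") : 1 ≤ pvPrio e := by
  rw [pvPrio_eq]; simp only [beq_iff_eq]
  split_ifs <;> first | omega | simp_all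

theorem pvPrio_ge_two {e : String} (h1 : e ≠ "json3") (h2 : e ≠ "srv3") : 2 ≤ pvPrio e := by
  rw [pvPrio_eq]; simp only [beq_iff_eq]
  split_ifs <;> first | omega | simp_all

theorem pvPrio_ge_three {e : String} (h1 : e ≠ "json3") (h2 : e ≠ "srv3") (h3 : e ≠ "vtt") :
    3 ≤ pvPrio e := by
  rw [pvPrio_eq]; simp only [beq_iff_eq]
  split_ifs <;> first | omega | simp_all

theorem pvPickExt_some {pref : String} {l : List (List (String × String))} {x : List (String × String)}
    (h : pvPickExt pref l = some x) : pvExtOf x = pref ∧ pvUrlOk x = true ∧ x ∈ l := by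
  induction l with
  | nil => simp [pvPickExt] at h
  | cons t ts ih =>
    simp only [pvPickExt] at h
    split at h
    · rename_i hc
      cases h
      simp only [Bool.and_eq_true, beq_iff_eq] at hc
      exact ⟨hc.1, hc.2, List.mem_cons_self ..⟩
    · rcases ih h with ⟨h1, h2, h3⟩
      exact ⟨h1, h2, List.mem_cons_of_mem _ h3⟩

theorem pvPickExt_none {pref : String} {l : List (List (String × String))}
    (h : pvPickExt pref l = none) : ∀ x ∈ l, pvUrlOk x = true → pvExtOf x ≠ pref := by
  induction l with
  | nil => simp
  | cons t ts ih =>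
    simp only [pvPickExt] at h
    split at h
    · simp at h
    · rename_i hc
      intro x hx hu
      rcases List.mem_cons.mp hx with rfl | hx
      · intro he; simp [he, hu] at hc
      · exact ih h x hx hu

theorem pvPickUrl_some {l : List (List (String × String))} {x : List (String × String)}
    (h : pvPickUrl l = some x) : pvUrlOk x = true ∧ x ∈ l := by
  induction l with
  | nil => simp [pvPickUrl] at h
  | cons t ts ih =>
    simp only [pvPickUrl] at h
    split at h
    · rename_i hc; cases h; exact ⟨hc, List.mem_cons_self ..⟩
    · rcases ih h with ⟨hu, hm⟩; exact ⟨hu, List.mem_cons_of_mem _ hm⟩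

theorem pvChain_some {l : List (List (String × String))} {u : List (String × String)}
    (h : pvChain l = some u) : u ∈ l ∧ pvUrlOk u = true := by
  unfold pvChain at h
  rcases hj : pvPickExt "json3" l with _ | x <;> rw [hj] at h
  case some =>
    cases h
    rcases pvPickExt_some hj with ⟨_, h2, h3⟩; exact ⟨h3, h2⟩
  rcases hs : pvPickExt "srv3" l with _ | x <;> rw [hs] at h
  case some =>
    cases h
    rcases pvPickExt_some hs with ⟨_, h2, h3⟩; exact ⟨h3, h2⟩
  rcases hv : pvPickExt "vtt" l with _ | x <;> rw [hv] at h
  case some =>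
    cases h
    rcases pvPickExt_some hv with ⟨_, h2, h3⟩; exact ⟨h3, h2⟩
  exact (pvPickUrl_some h).symm

-- A's chain equals pvSpec
theorem A_eq_spec (l : List (List (String × String))) :
    select_preferred_track_py l = pvSpec l := by
  induction l with
  | nil => rfl
  | cons t ts ih =>
    rw [A_unfold] at ih ⊢
    by_cases hu : pvUrlOk t
    case neg =>
      have hub : pvUrlOk t = false := by simpa using hu
      have hc : pvChain (t :: ts) = pvChain ts := by
        simp [pvChain, pvPickExt, pvPickUrl, hub]
      rw [hc, ih]
      simp [pvSpec, hub]
    case pos =>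
      simp only [pvSpec, hu, if_true]
      by_cases h0 : pvExtOf t = "json3"
      · have hc : pvChain (t :: ts) = some t := by simp [pvChain, pvPickExt, h0, hu]
        have ht : pvPrio (pvExtOf t) = 0 := by rw [h0]; decide
        rw [hc]
        cases hs : pvSpec ts with
        | none => rfl
        | some u =>
          have hn := pvPrio_nonneg (pvExtOf u)
          simp [pvMerge, show ¬ pvPrio (pvExtOf u) < pvPrio (pvExtOf t) from by omega]
      · have hj0 : pvPickExt "json3" (t :: ts) = pvPickExt "json3" ts := by
          simp [pvPickExt, h0]
        by_cases h1 : pvExtOf t = "srv3"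
        · have ht : pvPrio (pvExtOf t) = 1 := by rw [h1]; decide
          cases hj : pvPickExt "json3" ts with
          | some x =>
            have hc : pvChain (t :: ts) = some x := by simp [pvChain, hj0, hj]
            have hsx : pvSpec ts = some x := by rw [← ih]; simp [pvChain, hj]
            have hx : pvPrio (pvExtOf x) = 0 := by rw [(pvPickExt_some hj).1]; decide
            rw [hc, hsx]
            simp [pvMerge, show pvPrio (pvExtOf x) < pvPrio (pvExtOf t) from by omega]
          | none =>
            have hc : pvChain (t :: ts) = some t := by
              simp [pvChain, hj, pvPickExt, h1, hu]
            rw [hc]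
            cases hs : pvSpec ts with
            | none => rfl
            | some u =>
              have hcu : pvChain ts = some u := by rw [ih, hs]
              rcases pvChain_some hcu with ⟨hm, hurl⟩
              have hge := pvPrio_ge_one (pvPickExt_none hj u hm hurl)
              simp [pvMerge, show ¬ pvPrio (pvExtOf u) < pvPrio (pvExtOf t) from by omega]
        · have hs0 : pvPickExt "srv3" (t :: ts) = pvPickExt "srv3" ts := by
            simp [pvPickExt, h1]
          by_cases h2 : pvExtOf t = "vtt"
          · have ht : pvPrio (pvExtOf t) = 2 := by rw [h2]; decide
            cases hj : pvPickExt "json3" ts with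
            | some x =>
              have hc : pvChain (t :: ts) = some x := by simp [pvChain, hj0, hj]
              have hsx : pvSpec ts = some x := by rw [← ih]; simp [pvChain, hj]
              have hx : pvPrio (pvExtOf x) = 0 := by rw [(pvPickExt_some hj).1]; decide
              rw [hc, hsx]
              simp [pvMerge, show pvPrio (pvExtOf x) < pvPrio (pvExtOf t) from by omega]
            | none =>
              cases hsr : pvPickExt "srv3" ts with
              | some x =>
                have hc : pvChain (t :: ts) = some x := by simp [pvChain, hj0, hj, hs0, hsr]
                have hsx : pvSpec ts = some x := by rw [← ih]; simp [pvChain, hj, hsr]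
                have hx : pvPrio (pvExtOf x) = 1 := by rw [(pvPickExt_some hsr).1]; decide
                rw [hc, hsx]
                simp [pvMerge, show pvPrio (pvExtOf x) < pvPrio (pvExtOf t) from by omega]
              | none =>
                have hc : pvChain (t :: ts) = some t := by
                  simp [pvChain, hj, hsr, pvPickExt, h2, hu]
                rw [hc]
                cases hs : pvSpec ts with
                | none => rfl
                | some u =>
                  have hcu : pvChain ts = some u := by rw [ih, hs]
                  rcases pvChain_some hcu with ⟨hm, hurl⟩
                  have hge := pvPrio_ge_two (pvPickExt_none hj u hm hurl)
                    (pvPickExt_none hsr u hm hurl)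
                  simp [pvMerge, show ¬ pvPrio (pvExtOf u) < pvPrio (pvExtOf t) from by omega]
          · have ht : pvPrio (pvExtOf t) = 3 :=
              le_antisymm (pvPrio_le_three _) (pvPrio_ge_three h0 h1 h2)
            have hv0 : pvPickExt "vtt" (t :: ts) = pvPickExt "vtt" ts := by
              simp [pvPickExt, h2]
            cases hj : pvPickExt "json3" ts with
            | some x =>
              have hc : pvChain (t :: ts) = some x := by simp [pvChain, hj0, hj]
              have hsx : pvSpec ts = some x := by rw [← ih]; simp [pvChain, hj]
              have hx : pvPrio (pvExtOf x) = 0 := by rw [(pvPickExt_some hj).1]; decide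
              rw [hc, hsx]
              simp [pvMerge, show pvPrio (pvExtOf x) < pvPrio (pvExtOf t) from by omega]
            | none =>
              cases hsr : pvPickExt "srv3" ts with
              | some x =>
                have hc : pvChain (t :: ts) = some x := by simp [pvChain, hj0, hj, hs0, hsr]
                have hsx : pvSpec ts = some x := by rw [← ih]; simp [pvChain, hj, hsr]
                have hx : pvPrio (pvExtOf x) = 1 := by rw [(pvPickExt_some hsr).1]; decide
                rw [hc, hsx]
                simp [pvMerge, show pvPrio (pvExtOf x) < pvPrio (pvExtOf t) from by omega]
              | none =>
                cases hv : pvPickExt "vtt" ts with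
                | some x =>
                  have hc : pvChain (t :: ts) = some x := by
                    simp [pvChain, hj0, hj, hs0, hsr, hv0, hv]
                  have hsx : pvSpec ts = some x := by rw [← ih]; simp [pvChain, hj, hsr, hv]
                  have hx : pvPrio (pvExtOf x) = 2 := by rw [(pvPickExt_some hv).1]; decide
                  rw [hc, hsx]
                  simp [pvMerge, show pvPrio (pvExtOf x) < pvPrio (pvExtOf t) from by omega]
                | none =>
                  have hc : pvChain (t :: ts) = some t := by
                    simp [pvChain, hj0, hj, hs0, hsr, hv0, hv, pvPickUrl, hu]
                  rw [hc]
                  cases hs : pvSpec ts with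
                  | none => rfl
                  | some u =>
                    have hcu : pvChain ts = some u := by rw [ih, hs]
                    rcases pvChain_some hcu with ⟨hm, hurl⟩
                    have hge := pvPrio_ge_three (pvPickExt_none hj u hm hurl)
                      (pvPickExt_none hsr u hm hurl) (pvPickExt_none hv u hm hurl)
                    simp [pvMerge,
                      show ¬ pvPrio (pvExtOf u) < pvPrio (pvExtOf t) from by omega]

-- merging with a strictly better new best absorbs the old one
theorem pvMerge_absorb {b t : List (String × String)}
    (hlt : pvPrio (pvExtOf t) < pvPrio (pvExtOf b)) (o : Option (List (String × String))) :
    pvMerge b (pvMerge t o) = pvMerge t o := by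
  cases o with
  | none => simp [pvMerge, hlt]
  | some u =>
    by_cases h2 : pvPrio (pvExtOf u) < pvPrio (pvExtOf t)
    · simp [pvMerge, h2, show pvPrio (pvExtOf u) < pvPrio (pvExtOf b) from by omega]
    · simp [pvMerge, h2, hlt]

-- merging with a no-better new best is redundant
theorem pvMerge_skip {b t : List (String × String)}
    (hge : pvPrio (pvExtOf b) ≤ pvPrio (pvExtOf t)) (o : Option (List (String × String))) :
    pvMerge b (pvMerge t o) = pvMerge b o := by
  cases o with
  | none => simp [pvMerge, show ¬ pvPrio (pvExtOf t) < pvPrio (pvExtOf b) from by omega]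
  | some u =>
    by_cases h2 : pvPrio (pvExtOf u) < pvPrio (pvExtOf t)
    · simp [pvMerge, h2]
    · simp [pvMerge, h2, show ¬ pvPrio (pvExtOf t) < pvPrio (pvExtOf b) from by omega,
        show ¬ pvPrio (pvExtOf u) < pvPrio (pvExtOf b) from by omega]

-- B's accumulator run equals pvSpec merged with the current best
theorem goB_spec (l : List (List (String × String))) (b : List (String × String)) :
    pvGoB l (some b) (pvPrio (pvExtOf b)) = pvMerge b (pvSpec l) := by
  induction l generalizing b with
  | nil => rfl
  | cons t ts ih =>
    simp only [pvGoB, pvSpec]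
    by_cases hu : pvUrlOk t
    · simp only [hu, Bool.not_true, Bool.false_eq_true, if_false, if_true]
      by_cases hlt : pvPrio (pvExtOf t) < pvPrio (pvExtOf b)
      · rw [if_pos hlt, ih t, pvMerge_absorb hlt]
      · rw [if_neg hlt, ih b, pvMerge_skip (by omega)]
    · have hub : pvUrlOk t = false := by simpa using hu
      simp only [hub, Bool.not_false, if_true, Bool.false_eq_true, if_false]
      exact ih b

theorem B_eq_spec (l : List (List (String × String))) :
    select_preferred_track_py_alt l = pvSpec l := by
  unfold select_preferred_track_py_alt
  induction l with
  | nil => rfl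
  | cons t ts ih =>
    simp only [pvGoB, pvSpec]
    by_cases hu : pvUrlOk t
    · have h4 := pvPrio_le_three (pvExtOf t)
      simp only [hu, Bool.not_true, Bool.false_eq_true, if_false, if_true,
        if_pos (show pvPrio (pvExtOf t) < 4 by omega)]
      rw [goB_spec]
    · have hub : pvUrlOk t = false := by simpa using hu
      simp only [hub, Bool.not_false, if_true, Bool.false_eq_true, if_false]
      exact ih

-- ===== VERDICT (by name: the statement is the Claim_ definition above) =====
theorem select_preferred_track_py_spec : Claim_equal_select_preferred_track_py := by
  intro tracks _
  unfold Spec_select_preferred_track_py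
  rw [A_eq_spec, B_eq_spec]
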